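-- pv_equiv track=rewrite | github.com/thebayaan/Bayaan | scripts/rewayah/validate.py | char_deltas
-- ===== SOURCE A (Python) =====
-- def char_deltas(a: str, b: str) -> list[tuple[int, str, str]]:
--     out = []
--     la, lb = len(a), len(b)
--     i = j = 0
--     while i < la and j < lb:
--         if a[i] == b[j]:
--             i += 1
--             j += 1
--         else:
--             out.append((i, a[i], b[j]))
--             i += 1
--             j += 1
--     for k in range(i, la):
--         out.append((k, a[k], ""))
--     for k in range(j, lb):
--         out.append((k, "", b[k]))
--     return out
-- ===== SOURCE B (Python) =====
-- def char_deltas(a: str, b: str) -> list[tuple[int, str, str]]: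
--     # Build an index-keyed table in two independent passes (one per string),
--     # then read the mismatching rows off the table.
--     table = {}
--     for k, c in enumerate(a):
--         table[k] = (c, "")
--     for k, c in enumerate(b):
--         table[k] = (table.get(k, ("", ""))[0], c)
--     return [(k, x, y) for k, (x, y) in table.items() if x != y]
-- ===== Notes on version B (the rewrite author's own statement) =====
-- stated objective: alternative
-- what changed: Instead of A's synchronized scan (a while loop over the common length plus two tail loops collecting mismatches as it goes), B builds an index-keyed dict table in two independent passes -- one pass over a writing (c, "") per index, one pass over b overlaying the second component (defaulting the first to "") -- and then filters the table's items for rows whose two components differ.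
import Mathlib
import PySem

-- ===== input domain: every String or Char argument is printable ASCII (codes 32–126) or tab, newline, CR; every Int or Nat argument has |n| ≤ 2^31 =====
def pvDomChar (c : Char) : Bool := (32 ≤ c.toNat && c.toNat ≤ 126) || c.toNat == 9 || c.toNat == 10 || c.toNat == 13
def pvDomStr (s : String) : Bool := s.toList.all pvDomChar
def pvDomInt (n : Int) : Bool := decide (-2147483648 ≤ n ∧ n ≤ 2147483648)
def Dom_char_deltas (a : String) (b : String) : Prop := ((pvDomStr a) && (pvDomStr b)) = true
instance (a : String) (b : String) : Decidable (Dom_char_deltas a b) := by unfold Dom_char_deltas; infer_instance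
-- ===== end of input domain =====

-- B replaces A's synchronized mismatch-collecting scan with a different decomposition:
-- two independent passes build an index-keyed dict table (left column from a, right column
-- overlaid from b), and the mismatching rows are then read off the table's items.

-- ===== PORT A =====
-- tail loop `for k in range(i, la): out.append((k, a[k], ""))`
def pvTailA (k : Int) : List Char → List (Int × String × String)
  | [] => []
  | x :: xs => (k, x.toString, "") :: pvTailA (k + 1) xs

-- tail loop `for k in range(j, lb): out.append((k, "", b[k]))`
def pvTailB (k : Int) : List Char → List (Int × String × String)
  | [] => []
  | y :: ys => (k, "", y.toString) :: pvTailB (k + 1) ys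

-- the while loop (i and j always advance together, so one counter k = i = j)
def pvALoop (k : Int) : List Char → List Char → List (Int × String × String)
  | x :: xs, y :: ys =>
      if x = y then pvALoop (k + 1) xs ys
      else (k, x.toString, y.toString) :: pvALoop (k + 1) xs ys
  | xs, [] => pvTailA k xs
  | [], ys => pvTailB k ys

def char_deltas (a : String) (b : String) : List (Int × String × String) :=
  pvALoop 0 a.toList b.toList

-- ===== PORT B =====
-- `table = {}; for k, c in enumerate(a): table[k] = (c, "")`
-- `for k, c in enumerate(b): table[k] = (table.get(k, ("", ""))[0], c)`
-- `return [(k, x, y) for k, (x, y) in table.items() if x != y]`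
def char_deltas_alt (a : String) (b : String) : List (Int × String × String) :=
  let d1 := (PySem.List.enumerate a.toList 0).foldl
      (fun d p => d.insert p.1 (p.2.toString, "")) PySem.Dict.empty
  let d2 := (PySem.List.enumerate b.toList 0).foldl
      (fun d p => d.insert p.1 ((d.getD p.1 ("", "")).1, p.2.toString)) d1
  d2.items.filterMap (fun q => if q.2.1 = q.2.2 then none else some (q.1, q.2.1, q.2.2))

-- ===== PRECONDITION & SPEC =====
def Spec_char_deltas (a : String) (b : String) (out : List (Int × String × String)) : Prop := out = char_deltas_alt a b
instance (a : String) (b : String) (out : List (Int × String × String)) : Decidable (Spec_char_deltas a b out) := by unfold Spec_char_deltas; infer_instance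

-- ===== CLAIM =====
def Claim_equal_char_deltas : Prop := ∀ (a : String) (b : String), Dom_char_deltas a b → Spec_char_deltas a b (char_deltas a b)

-- ===== LEMMAS AND PROOFS =====
-- the ""-padded zip of the two character columns, as a plain list
def pvZipFill : List String → List String → List (String × String)
  | x :: xs, y :: ys => (x, y) :: pvZipFill xs ys
  | x :: xs, [] => (x, "") :: pvZipFill xs []
  | [], y :: ys => ("", y) :: pvZipFill [] ys
  | [], [] => []

-- overlaying ys onto existing rows, as the second fold does positionally

theorem singleton_inj {x y : Char} (h : String.singleton x = String.singleton y) : x = y := by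
  have := congrArg String.toList h
  simpa using this


def pvOverlay : List (String × String) → List Char → List (String × String)
  | rs, [] => rs
  | r :: rs, c :: cs => (r.1, c.toString) :: pvOverlay rs cs
  | [], c :: cs => ("", c.toString) :: pvOverlay [] cs

theorem enumerate_map_snd {α β : Type} (f : α → β) (xs : List α) (k : Int) :
    (PySem.List.enumerate xs k).map (fun p => (p.1, f p.2)) = PySem.List.enumerate (xs.map f) k := by
  induction xs generalizing k with
  | nil => simp [PySem.List.enumerate_nil]
  | cons x xs ih => simp [PySem.List.enumerate_cons, ih]

theorem insert_mk_cons (k m : Int) (hne : m ≠ k) (v w : String × String) (d : PySem.Dict Int (String × String)) :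
    PySem.Dict.insert (PySem.Dict.mk ((k,v) :: d.items)) m w
      = PySem.Dict.mk ((k,v) :: (PySem.Dict.insert d m w).items) := by
  have hkm : k ≠ m := Ne.symm hne
  by_cases hc : (d.items.any fun p => p.1 == m) = true
  · simp [PySem.Dict.insert, PySem.Dict.contains, hkm, hc]
  · simp [PySem.Dict.insert, PySem.Dict.contains, hkm, hc]

theorem getD_mk_cons (k m : Int) (hne : m ≠ k) (v d0 : String × String) (d : PySem.Dict Int (String × String)) :
    PySem.Dict.getD (PySem.Dict.mk ((k,v) :: d.items)) m d0 = PySem.Dict.getD d m d0 := by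
  simp [PySem.Dict.getD_eq_get?_getD, PySem.Dict.get?_mk_cons, Ne.symm hne]

theorem getD_mk_head (k : Int) (v d0 : String × String) (L : List (Int × (String × String))) :
    PySem.Dict.getD (PySem.Dict.mk ((k,v)::L)) k d0 = v := by
  simp [PySem.Dict.getD_eq_get?_getD, PySem.Dict.get?_mk_cons]

theorem insert_mk_head (k : Int) (v w : String × String) (L : List (Int × (String × String)))
    (h : ∀ p ∈ L, p.1 ≠ k) :
    PySem.Dict.insert (PySem.Dict.mk ((k,v)::L)) k w = PySem.Dict.mk ((k,w)::L) := by
  have hmap : L.map (fun p => if p.1 = k then (k, w) else p) = L := by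
    have := List.map_congr_left (l := L) (g := id)
      (f := fun p => if p.1 = k then (k, w) else p)
      (fun p hp => by simp [h p hp])
    simpa using this
  simp [PySem.Dict.insert, PySem.Dict.contains, hmap]

theorem insert_mk_nil (k : Int) (w : String × String) :
    PySem.Dict.insert (PySem.Dict.mk []) k w = PySem.Dict.mk [(k,w)] := by
  simp [PySem.Dict.insert, PySem.Dict.contains]

theorem fold_cons (cs : List Char) (m k : Int) (h : k < m) (v : String × String)
    (d : PySem.Dict Int (String × String)) :
    (PySem.List.enumerate cs m).foldl
        (fun d p => d.insert p.1 ((d.getD p.1 ("", "")).1, p.2.toString))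
        (PySem.Dict.mk ((k,v) :: d.items))
      = PySem.Dict.mk ((k,v) ::
          ((PySem.List.enumerate cs m).foldl
            (fun d p => d.insert p.1 ((d.getD p.1 ("", "")).1, p.2.toString)) d).items) := by
  induction cs generalizing m d with
  | nil => simp [PySem.List.enumerate_nil]
  | cons c cs ih =>
      have hne : m ≠ k := by omega
      simp only [PySem.List.enumerate_cons, List.foldl_cons]
      rw [getD_mk_cons k m hne, insert_mk_cons k m hne]
      exact ih (m + 1) (by omega) _

theorem fold2_items (ys : List Char) (rows : List (String × String)) (k : Int) :
    ((PySem.List.enumerate ys k).foldl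
      (fun d p => d.insert p.1 ((d.getD p.1 ("", "")).1, p.2.toString))
      (PySem.Dict.mk (PySem.List.enumerate rows k))).items
      = PySem.List.enumerate (pvOverlay rows ys) k := by
  induction ys generalizing rows k with
  | nil => simp [PySem.List.enumerate_nil, pvOverlay]
  | cons c cs ih =>
      cases rows with
      | nil =>
          simp only [PySem.List.enumerate_nil, PySem.List.enumerate_cons, List.foldl_cons]
          rw [show PySem.Dict.getD (PySem.Dict.mk ([] : List (Int × (String × String)))) k ("", "") = ("", "") from rfl]
          rw [insert_mk_nil]
          have hf := fold_cons cs (k+1) k (by omega) ("", c.toString) (PySem.Dict.mk [])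
          rw [show PySem.Dict.mk [(k, (("" : String), c.toString))] =
            PySem.Dict.mk ((k, (("" : String), c.toString)) :: (PySem.Dict.mk ([] : List (Int × (String × String)))).items) from rfl]
          rw [hf]
          have h0 := ih ([] : List (String × String)) (k+1)
          simp only [PySem.List.enumerate_nil] at h0
          show (k, (("" : String), c.toString)) :: _ = _
          rw [h0]
          simp [pvOverlay, PySem.List.enumerate_cons]
      | cons r rs =>
          simp only [PySem.List.enumerate_cons, List.foldl_cons]
          rw [getD_mk_head]
          rw [insert_mk_head k r (r.1, c.toString) _ (by
            intro p hp
            rcases (PySem.List.mem_enumerate_iff _ _ _).1 hp with ⟨j, hj, rfl⟩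
            simp
            omega)]
          have hf := fold_cons cs (k+1) k (by omega) (r.1, c.toString)
            (PySem.Dict.mk (PySem.List.enumerate rs (k+1)))
          rw [show (PySem.Dict.mk (PySem.List.enumerate rs (k+1))).items
            = PySem.List.enumerate rs (k+1) from rfl] at hf
          rw [hf]
          show (k, (r.1, c.toString)) :: _ = _
          rw [ih rs (k+1)]
          simp [pvOverlay, PySem.List.enumerate_cons]

theorem fold1_items (a : String) :
    ((PySem.List.enumerate a.toList 0).foldl
      (fun d p => d.insert p.1 (p.2.toString, "")) PySem.Dict.empty).items
      = PySem.List.enumerate (a.toList.map (fun c => (c.toString, ""))) 0 := by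
  rw [PySem.Dict.items_foldl_insert_fresh]
  · rw [← enumerate_map_snd (fun c : Char => (c.toString, "")) a.toList 0]
    simp [PySem.Dict.empty]
  · intro p _
    exact PySem.Dict.contains_empty p.1
  · rw [PySem.List.map_fst_enumerate]
    exact PySem.List.nodup_pyRange_one _ _

theorem zipfill_nil_right (xs : List Char) :
    pvZipFill (xs.map Char.toString) [] = xs.map (fun c => (c.toString, "")) := by
  induction xs with
  | nil => simp [pvZipFill]
  | cons x xs ih => simp only [List.map_cons, pvZipFill, ih]

theorem overlay_nil_left (ys : List Char) :
    pvOverlay [] ys = pvZipFill [] (ys.map Char.toString) := by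
  induction ys with
  | nil => simp [pvOverlay, pvZipFill]
  | cons y ys ih => simp only [List.map_cons, pvOverlay, pvZipFill, ih]

theorem overlay_zipfill (xs : List Char) (ys : List Char) :
    pvOverlay (xs.map (fun c => (c.toString, ""))) ys
      = pvZipFill (xs.map Char.toString) (ys.map Char.toString) := by
  induction xs generalizing ys with
  | nil => simpa using overlay_nil_left ys
  | cons x xs ih =>
      cases ys with
      | nil =>
          simp only [List.map_cons, List.map_nil, pvOverlay, pvZipFill]
          rw [zipfill_nil_right xs]
      | cons y ys => simp only [List.map_cons, pvOverlay, pvZipFill, ih]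

theorem tailA_eq (xs : List Char) (k : Int) :
    (PySem.List.enumerate (pvZipFill (xs.map Char.toString) []) k).filterMap
      (fun p => if p.2.1 = p.2.2 then none else some (p.1, p.2.1, p.2.2)) = pvTailA k xs := by
  induction xs generalizing k with
  | nil => simp [pvZipFill, PySem.List.enumerate_nil, pvTailA]
  | cons x xs ih =>
      simp [pvZipFill, PySem.List.enumerate_cons, pvTailA, ih]

theorem tailB_eq (ys : List Char) (k : Int) :
    (PySem.List.enumerate (pvZipFill [] (ys.map Char.toString)) k).filterMap
      (fun p => if p.2.1 = p.2.2 then none else some (p.1, p.2.1, p.2.2)) = pvTailB k ys := by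
  induction ys generalizing k with
  | nil => simp [pvZipFill, PySem.List.enumerate_nil, pvTailB]
  | cons y ys ih =>
      simp [pvZipFill, PySem.List.enumerate_cons, pvTailB, ih]

theorem main_eq (xs ys : List Char) (k : Int) :
    (PySem.List.enumerate (pvZipFill (xs.map Char.toString) (ys.map Char.toString)) k).filterMap
      (fun p => if p.2.1 = p.2.2 then none else some (p.1, p.2.1, p.2.2)) = pvALoop k xs ys := by
  induction xs generalizing ys k with
  | nil => cases ys with
    | nil => simp [pvZipFill, PySem.List.enumerate_nil, pvALoop, pvTailA]
    | cons y ys => simpa [pvALoop] using tailB_eq (y :: ys) k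
  | cons x xs ih =>
      cases ys with
      | nil => simpa [pvALoop] using tailA_eq (x :: xs) k
      | cons y ys =>
          by_cases hxy : x = y
          · subst hxy
            simp [pvZipFill, PySem.List.enumerate_cons, pvALoop, ih]
          · have hne : String.singleton x ≠ String.singleton y := fun h => hxy (singleton_inj h)
            simp [pvZipFill, PySem.List.enumerate_cons, pvALoop, hxy, hne, ih]


-- ===== VERDICT =====
theorem char_deltas_spec : Claim_equal_char_deltas := by
  intro a b _
  unfold Spec_char_deltas char_deltas char_deltas_alt
  have hd1 : ((PySem.List.enumerate a.toList 0).foldl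
      (fun d p => d.insert p.1 (p.2.toString, "")) PySem.Dict.empty)
      = PySem.Dict.mk (PySem.List.enumerate (a.toList.map (fun c => (c.toString, ""))) 0) :=
    PySem.Dict.ext (fold1_items a)
  rw [hd1]
  simp only [fold2_items, overlay_zipfill, main_eq]
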